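-- pv_equiv track=rewrite | github.com/lanpirot/cicd-oracle | ci-cd-merge-resolver/src/main/resources/pattern-heuristics/complete_workflow.py | count_and_rank_strategies
-- ===== SOURCE A (Python) =====
-- from collections import Counter
--
-- def count_and_rank_strategies(input_data):
--     """Count and rank substrategies."""
--     output_data = []
--     for row in input_data:
--         if len(row) < 2:
--             output_data.append(row)
--             continue
--         number_of_chunks = row[0]
--         strategies = row[1].split('|')
--         strategy_counts = Counter(strategies)
--         sorted_strategies = sorted(strategy_counts.items(), key=lambda x: (-x[1], x[0]))
--         ranked_strategies = [f"{count}*{strategy}" for strategy, count in sorted_strategies]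
--         output_data.append([number_of_chunks, '|'.join(ranked_strategies)])
--     return output_data
-- ===== SOURCE B (Python) =====
-- def count_and_rank_strategies(input_data):
--     """Count and rank substrategies (sort + run-length grouping instead of Counter)."""
--     output_data = []
--     for row in input_data:
--         if len(row) < 2:
--             output_data.append(row)
--             continue
--         names = sorted(row[1].split('|'))
--         pairs = []
--         prev = names[0]
--         run = 1
--         for name in names[1:]:
--             if name == prev:
--                 run += 1
--             else:
--                 pairs.append((prev, run))
--                 prev = name
--                 run = 1
--         pairs.append((prev, run))
--         pairs.sort(key=lambda p: (-p[1], p[0]))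
--         output_data.append([row[0], '|'.join(f"{c}*{s}" for s, c in pairs)])
--     return output_data
-- ===== Notes on version B (the rewrite author's own statement) =====
-- stated objective: alternative
-- what changed: Replaces Counter-based frequency counting with sorting the strategy names and run-length grouping adjacent equal names, then one stable sort of the (name,count) pairs by (-count,name).
import Mathlib
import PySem

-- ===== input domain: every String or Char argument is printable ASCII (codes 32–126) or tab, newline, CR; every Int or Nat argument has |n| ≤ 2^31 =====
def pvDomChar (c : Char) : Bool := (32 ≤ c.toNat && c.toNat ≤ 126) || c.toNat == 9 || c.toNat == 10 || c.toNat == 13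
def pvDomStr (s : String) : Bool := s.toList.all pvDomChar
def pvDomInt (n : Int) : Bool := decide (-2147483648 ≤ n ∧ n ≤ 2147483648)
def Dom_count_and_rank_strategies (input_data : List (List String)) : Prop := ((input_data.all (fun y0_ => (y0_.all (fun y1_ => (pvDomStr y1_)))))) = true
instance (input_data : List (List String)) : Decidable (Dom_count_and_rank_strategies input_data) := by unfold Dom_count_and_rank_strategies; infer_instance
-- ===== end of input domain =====

-- B replaces A's Counter-then-sort-by-(-count,name) with sort-names / run-length-group / sort-pairs (objective: alternative; same results).

-- ===== PORT A =====
-- A's loop body for one row (the loop appends one output row per input row)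
def pvRowA (row : List String) : List String :=
  if row.length < 2 then row
  else
    match row with
    | number_of_chunks :: strat :: _ =>
      let strategies := (PySem.Str.split? strat "|").getD []
      let strategy_counts := PySem.Dict.counter strategies
      let sorted_strategies := PySem.List.sorted2 strategy_counts.items (fun x => -x.2) (fun x => x.1)
      let ranked_strategies := sorted_strategies.map (fun x => PySem.Int.toStr x.2 ++ "*" ++ x.1)
      [number_of_chunks, PySem.Str.join "|" ranked_strategies]
    | _ => row  -- unreachable: row.length ≥ 2

def count_and_rank_strategies (input_data : List (List String)) : List (List String) :=
  input_data.foldl (fun output_data row => output_data ++ [pvRowA row]) []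

-- ===== PORT B =====
-- B's run-length grouping loop over the already-sorted names (prev, run, pairs accumulator)
def pvPairsB (names : List String) : List (String × Int) :=
  match names with
  | [] => []  -- unreachable: split('|') never returns an empty list
  | n0 :: rest =>
    let st := rest.foldl
      (fun st name =>
        if name == st.1 then (st.1, st.2.1 + 1, st.2.2)
        else (name, (1 : Int), st.2.2 ++ [(st.1, st.2.1)]))
      (n0, (1 : Int), ([] : List (String × Int)))
    st.2.2 ++ [(st.1, st.2.1)]

-- B's loop body for one row: sort the names, run-length group adjacent equals, sort the (name, count) pairs
def pvRowB (row : List String) : List String :=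
  if row.length < 2 then row
  else
    match row with
    | number_of_chunks :: strat :: _ =>
      let names := PySem.List.sorted ((PySem.Str.split? strat "|").getD []) (fun x => x)
      let pairs := pvPairsB names
      let ranked := (PySem.List.sorted2 pairs (fun x => -x.2) (fun x => x.1)).map
        (fun x => PySem.Int.toStr x.2 ++ "*" ++ x.1)
      [number_of_chunks, PySem.Str.join "|" ranked]
    | _ => row  -- unreachable: row.length ≥ 2

def count_and_rank_strategies_alt (input_data : List (List String)) : List (List String) :=
  input_data.foldl (fun output_data row => output_data ++ [pvRowB row]) []

-- ===== PRECONDITION & SPEC =====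
def Spec_count_and_rank_strategies (input_data : List (List String)) (out : List (List String)) : Prop := out = count_and_rank_strategies_alt input_data
instance (input_data : List (List String)) (out : List (List String)) : Decidable (Spec_count_and_rank_strategies input_data out) := by unfold Spec_count_and_rank_strategies; infer_instance

-- ===== CLAIM (what is proved, stated in full; the proofs are below) =====
def Claim_equal_count_and_rank_strategies : Prop := ∀ (input_data : List (List String)), Dom_count_and_rank_strategies input_data → Spec_count_and_rank_strategies input_data (count_and_rank_strategies input_data)

-- ===== LEMMAS AND PROOFS =====

-- proof-side recursive form of B's run-length grouping loop
def pvGroupGo : String → Int → List String → List (String × Int)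
  | prev, run, [] => [(prev, run)]
  | prev, run, x :: xs => if x == prev then pvGroupGo prev (run + 1) xs else (prev, run) :: pvGroupGo x 1 xs

def pvGroupRuns : List String → List (String × Int)
  | [] => []
  | x :: xs => pvGroupGo x 1 xs

lemma pvFoldl_eq_groupGo (s : List String) : ∀ (prev : String) (run : Int) (pairs : List (String × Int)),
    ((s.foldl
        (fun st name =>
          if name == st.1 then (st.1, st.2.1 + 1, st.2.2)
          else (name, (1 : Int), st.2.2 ++ [(st.1, st.2.1)]))
        (prev, run, pairs)).2.2
      ++ [((s.foldl
        (fun st name =>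
          if name == st.1 then (st.1, st.2.1 + 1, st.2.2)
          else (name, (1 : Int), st.2.2 ++ [(st.1, st.2.1)]))
        (prev, run, pairs)).1,
        (s.foldl
        (fun st name =>
          if name == st.1 then (st.1, st.2.1 + 1, st.2.2)
          else (name, (1 : Int), st.2.2 ++ [(st.1, st.2.1)]))
        (prev, run, pairs)).2.1)])
      = pairs ++ pvGroupGo prev run s := by
  induction s with
  | nil => intro prev run pairs; simp [pvGroupGo]
  | cons x xs ih =>
    intro prev run pairs
    by_cases h : x = prev
    · simpa [pvGroupGo, h] using ih prev (run + 1) pairs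
    · simpa [pvGroupGo, h, List.append_assoc] using ih x 1 (pairs ++ [(prev, run)])

lemma pvPairsB_eq (names : List String) : pvPairsB names = pvGroupRuns names := by
  cases names with
  | nil => rfl
  | cons n0 rest =>
    have := pvFoldl_eq_groupGo rest n0 1 []
    simpa [pvPairsB, pvGroupRuns] using this

lemma pvGroupGo_eq (prev : String) (s : List String) : ∀ run : Int,
    pvGroupGo prev run s
      = (prev, run + ((s.takeWhile (fun y => y == prev)).length : Int))
          :: pvGroupRuns (s.dropWhile (fun y => y == prev)) := by
  induction s with
  | nil => intro run; simp [pvGroupGo, pvGroupRuns]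
  | cons x xs ih =>
    intro run
    by_cases h : (x == prev) = true
    · rw [show pvGroupGo prev run (x :: xs) = pvGroupGo prev (run + 1) xs by simp [pvGroupGo, h]]
      rw [ih (run + 1)]
      simp [h]
      ring
    · rw [show pvGroupGo prev run (x :: xs) = (prev, run) :: pvGroupGo x 1 xs by simp [pvGroupGo, h]]
      simp [h, pvGroupRuns]

lemma pvGroupRuns_spec : ∀ (n : Nat) (s : List String), s.length ≤ n → s.Pairwise (· ≤ ·) →
    (∀ p ∈ pvGroupRuns s, p.1 ∈ s ∧ p.2 = (s.count p.1 : Int)) ∧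
    ((pvGroupRuns s).map Prod.fst).Nodup ∧
    (∀ k, k ∈ (pvGroupRuns s).map Prod.fst ↔ k ∈ s) := by
  intro n
  induction n with
  | zero =>
    intro s hlen _
    cases s with
    | nil => simp [pvGroupRuns]
    | cons x xs => simp at hlen
  | succ n ih =>
    intro s hlen hs
    cases s with
    | nil => simp [pvGroupRuns]
    | cons x xs =>
      have hgr : pvGroupRuns (x :: xs)
          = (x, 1 + ((xs.takeWhile (fun y => y == x)).length : Int))
              :: pvGroupRuns (xs.dropWhile (fun y => y == x)) := by
        simpa [pvGroupRuns] using pvGroupGo_eq x xs 1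
      set tw := xs.takeWhile (fun y => y == x) with htw
      set t := xs.dropWhile (fun y => y == x) with ht
      have hxs_split : tw ++ t = xs := List.takeWhile_append_dropWhile
      have htsub : t.Sublist xs := List.dropWhile_sublist _
      obtain ⟨hxle, hxs_pw⟩ := List.pairwise_cons.mp hs
      have htsorted : t.Pairwise (· ≤ ·) := hxs_pw.sublist htsub
      have hxlt : ∀ y ∈ t, x < y := by
        intro y hy
        cases hteq : t with
        | nil => rw [hteq] at hy; cases hy
        | cons h0 tt =>
          have hh0 : ¬ ((h0 == x) = true) := by
            have hh := List.head?_dropWhile_not (p := fun y => y == x) (l := xs)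
            rw [← ht, hteq] at hh
            simpa using hh
          have hh0x : h0 ≠ x := by simpa using hh0
          have hh0mem : h0 ∈ xs := htsub.subset (by rw [hteq]; exact List.mem_cons_self)
          have hxh0 : x < h0 := lt_of_le_of_ne (hxle h0 hh0mem) (Ne.symm hh0x)
          rw [hteq] at hy
          rcases List.mem_cons.mp hy with rfl | hy'
          · exact hxh0
          · have hle : h0 ≤ y := (List.pairwise_cons.mp (hteq ▸ htsorted)).1 y hy'
            exact lt_of_lt_of_le hxh0 hle
      have hxnott : x ∉ t := fun hx => lt_irrefl x (hxlt x hx)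
      have htw_all : ∀ a ∈ tw, a = x := by
        intro a ha
        have := List.mem_takeWhile_imp ha
        simpa using this
      have hcount_tw : tw.count x = tw.length :=
        List.count_eq_length.mpr (fun b hb => (htw_all b hb).symm)
      have hcountx : (x :: xs).count x = 1 + tw.length := by
        rw [List.count_cons_self, ← hxs_split, List.count_append]
        rw [hcount_tw, List.count_eq_zero.mpr hxnott]
        omega
      have hcountk : ∀ k ∈ t, (x :: xs).count k = t.count k := by
        intro k hk
        have hkx : k ≠ x := fun h => (lt_irrefl x (h ▸ hxlt k hk))
        have htwk : tw.count k = 0 := List.count_eq_zero.mpr (fun hmem => hkx (htw_all k hmem))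
        have e1 : List.count k (x :: xs) = List.count k xs := by simp [Ne.symm hkx]
        rw [e1, ← hxs_split, List.count_append, htwk]
        omega
      have hlen' : t.length ≤ n := by
        have h1 : t.length ≤ xs.length := htsub.length_le
        have h2 : xs.length + 1 ≤ n + 1 := by simpa using hlen
        omega
      obtain ⟨ih1, ih2, ih3⟩ := ih t hlen' htsorted
      refine ⟨?_, ?_, ?_⟩
      · intro p hp
        rw [hgr] at hp
        rcases List.mem_cons.mp hp with rfl | hp'
        · refine ⟨List.mem_cons_self, ?_⟩
          show (1 : Int) + (tw.length : Int) = ((x :: xs).count x : Int)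
          rw [hcountx]
          push_cast
          ring
        · obtain ⟨hmem, hcnt⟩ := ih1 p hp'
          refine ⟨List.mem_cons_of_mem x (htsub.subset hmem), ?_⟩
          rw [hcnt, hcountk p.1 hmem]
      · rw [hgr]
        simp only [List.map_cons, List.nodup_cons]
        refine ⟨?_, ih2⟩
        intro hx
        exact hxnott ((ih3 x).mp hx)
      · intro k
        rw [hgr]
        simp only [List.map_cons, List.mem_cons, ih3]
        constructor
        · rintro (rfl | hk)
          · exact Or.inl rfl
          · exact Or.inr (htsub.subset hk)
        · rintro (rfl | hk')
          · exact Or.inl rfl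
          · rw [← hxs_split] at hk'
            rcases List.mem_append.mp hk' with hmem | hmem
            · exact Or.inl (htw_all k hmem)
            · exact Or.inr hmem

-- Python's tuple-keyed sort IS the single-keyed sort under the lexicographic order on Lex (Int × String)
lemma pvSorted2_eq_sorted_lex {α : Type} (xs : List α) (k1 : α → Int) (k2 : α → String) :
    PySem.List.sorted2 xs k1 k2 = PySem.List.sorted xs (fun a => toLex (k1 a, k2 a)) := by
  have hf : (fun a b => decide (k1 a < k1 b) || (!decide (k1 b < k1 a) && decide (k2 a < k2 b)))
      = (fun (a b : α) => decide (toLex (k1 a, k2 a) < toLex (k1 b, k2 b))) := by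
    funext a b
    have hlex : (toLex (k1 a, k2 a) < toLex (k1 b, k2 b)) ↔ (k1 a < k1 b ∨ (k1 a = k1 b ∧ k2 a < k2 b)) :=
      Prod.Lex.lt_iff
    have hb : decide (toLex (k1 a, k2 a) < toLex (k1 b, k2 b))
        = decide (k1 a < k1 b ∨ (k1 a = k1 b ∧ k2 a < k2 b)) := by
      simp only [decide_eq_decide]
      exact hlex
    rw [hb]
    rcases lt_trichotomy (k1 a) (k1 b) with h | h | h
    · simp [h]
    · simp [h]
    · simp [h, show ¬ k1 a < k1 b from by omega, show k1 a ≠ k1 b from by omega]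
  simp only [PySem.List.sorted2, PySem.List.sorted]
  rw [hf]
  rfl

-- the two pair lists are permutations of each other, and the tuple key is injective, so the sorts agree
lemma pvSorted_pairs_eq (l : List String) :
    PySem.List.sorted2 (PySem.Dict.counter l).items (fun x => -x.2) (fun x => x.1)
      = PySem.List.sorted2 (pvGroupRuns (PySem.List.sorted l (fun x => x))) (fun x => -x.2) (fun x => x.1) := by
  set s := PySem.List.sorted l (fun x => x) with hs
  have hsperm : s.Perm l := PySem.List.sorted_perm l (fun x => x) false
  have hssorted : s.Pairwise (· ≤ ·) := by
    simpa using PySem.List.sorted_pairwise l (fun x => x)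
  obtain ⟨h1, h2, h3⟩ := pvGroupRuns_spec s.length s le_rfl hssorted
  have hmapf : ∀ p ∈ pvGroupRuns s, (p.1, (l.count p.1 : Int)) = p := by
    intro p hp
    obtain ⟨hmem, hcnt⟩ := h1 p hp
    have hc : s.count p.1 = l.count p.1 := hsperm.count_eq p.1
    obtain ⟨a, c⟩ := p
    simp only [Prod.mk.injEq, true_and]
    have h4 : c = (List.count a s : Int) := hcnt
    have h5 : List.count a s = List.count a l := hc
    rw [h4, h5]
  have hPB : ((pvGroupRuns s).map Prod.fst).map (fun k => (k, (l.count k : Int))) = pvGroupRuns s := by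
    rw [List.map_map]
    refine (List.map_congr_left ?_).trans (List.map_id _)
    intro p hp
    simpa using hmapf p hp
  have hkeys : ((pvGroupRuns s).map Prod.fst).Perm (PySem.Set.ofList l) := by
    rw [List.perm_ext_iff_of_nodup h2 (PySem.Set.nodup_ofList l)]
    intro k
    rw [h3 k]
    simp [hsperm.mem_iff, PySem.Set.mem_ofList]
  have hperm : (PySem.Dict.counter l).items.Perm (pvGroupRuns s) := by
    have hm := (hkeys.map (fun k => (k, (l.count k : Int)))).symm
    rw [hPB] at hm
    rw [PySem.Dict.items_counter]
    exact hm
  rw [pvSorted2_eq_sorted_lex, pvSorted2_eq_sorted_lex]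
  apply PySem.List.sorted_eq_sorted_of_perm
  · intro p q h
    have h2' : ((-p.2 : Int), p.1) = ((-q.2 : Int), q.1) := by
      have := congrArg ofLex h
      simpa using this
    obtain ⟨a, c⟩ := p
    obtain ⟨a', c'⟩ := q
    simp only [Prod.mk.injEq] at h2' ⊢
    exact ⟨h2'.2, by omega⟩
  · exact hperm

lemma pvRow_eq (row : List String) : pvRowA row = pvRowB row := by
  match row with
  | [] => rfl
  | [a] => rfl
  | a :: b :: rest =>
    have h2 : ¬ ((a :: b :: rest).length < 2) := by simp
    simp only [pvRowA, pvRowB, if_neg h2, pvPairsB_eq]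
    rw [← pvSorted_pairs_eq]

-- ===== VERDICT (by name: the statement is the Claim_ definition above) =====
theorem count_and_rank_strategies_spec : Claim_equal_count_and_rank_strategies := by
  intro input_data _
  unfold Spec_count_and_rank_strategies
  unfold count_and_rank_strategies count_and_rank_strategies_alt
  rw [PySem.List.foldl_append_singleton_eq_map, PySem.List.foldl_append_singleton_eq_map]
  exact List.map_congr_left (fun row _ => pvRow_eq row)
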